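-- pv_equiv track=rewrite | github.com/Clint171/Arrays | lcs.py | generate_array
-- ===== SOURCE A (Python) =====
-- def generate_array(str1 : str , str2 : str):
--     union = []
--     for i in range(0 , len(str1)):
--         row = []
--         for j in range(0 , len(str2)):
--             if(str1[i] == str2[j]):
--                 row.append(1)
--             else:
--                 row.append(0)
--         union.append(row)
--
--     return union
-- ===== SOURCE B (Python) =====
-- def generate_array(str1: str, str2: str):
--     # Index each character of str2 by its columns once, then fill rows by index.
--     positions = {}
--     for j, ch in enumerate(str2):
--         positions.setdefault(ch, []).append(j)
--
--     def make_row(ch):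
--         row = [0] * len(str2)
--         for j in positions.get(ch, []):
--             row[j] = 1
--         return row
--
--     return [make_row(ch) for ch in str1]
-- ===== Notes on version B (the rewrite author's own statement) =====
-- stated objective: faster
-- what changed: B first builds a dict mapping each character of str2 to its list of column indices, then produces each row by index-filling a zero row ([0]*len) from that dict, replacing the per-cell equality comparison of A.
import Mathlib
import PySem

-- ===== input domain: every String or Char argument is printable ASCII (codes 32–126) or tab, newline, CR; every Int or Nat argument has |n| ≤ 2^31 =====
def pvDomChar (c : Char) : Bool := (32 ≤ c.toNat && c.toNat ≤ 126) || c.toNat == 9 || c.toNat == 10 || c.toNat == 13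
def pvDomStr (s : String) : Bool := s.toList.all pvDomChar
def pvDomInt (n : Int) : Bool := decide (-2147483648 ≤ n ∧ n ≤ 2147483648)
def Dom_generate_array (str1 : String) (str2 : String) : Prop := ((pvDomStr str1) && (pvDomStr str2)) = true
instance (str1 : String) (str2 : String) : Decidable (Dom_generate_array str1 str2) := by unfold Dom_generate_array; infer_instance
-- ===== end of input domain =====

-- B builds a char -> column-index dict over str2 once and fills each row by index; same output, alternative structure.

-- ===== PORT A =====
-- for i: for j: append 1/0 to row; append row to union
def generate_array (str1 : String) (str2 : String) : List (List Int) :=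
  str1.toList.foldl (fun union c =>
    union ++ [str2.toList.foldl (fun row d => row ++ [if c = d then (1 : Int) else 0]) []]) []

-- ===== PORT B =====
-- positions: dict from each char of str2 to the list of its column indices (setdefault/append)
def pvPositions (str2 : String) : PySem.Dict Char (List Int) :=
  (PySem.List.enumerate str2.toList 0).foldl
    (fun d p => d.insert p.2 (d.getD p.2 [] ++ [p.1])) PySem.Dict.empty

-- make_row: zero row of length len(str2), then row[j] = 1 for each stored column j
def pvMakeRow (str2 : String) (pos : PySem.Dict Char (List Int)) (c : Char) : List Int :=
  (pos.getD c []).foldl (fun row j => row.set j.toNat 1) (List.replicate str2.toList.length (0 : Int))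

def generate_array_alt (str1 : String) (str2 : String) : List (List Int) :=
  str1.toList.map (pvMakeRow str2 (pvPositions str2))

-- ===== PRECONDITION & SPEC =====
def Spec_generate_array (str1 : String) (str2 : String) (out : List (List Int)) : Prop := out = generate_array_alt str1 str2
instance (str1 : String) (str2 : String) (out : List (List Int)) : Decidable (Spec_generate_array str1 str2 out) := by unfold Spec_generate_array; infer_instance

-- ===== CLAIM (what is proved, stated in full; the proofs are below) =====
def Claim_equal_generate_array : Prop := ∀ (str1 : String) (str2 : String), Dom_generate_array str1 str2 → Spec_generate_array str1 str2 (generate_array str1 str2)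

-- ===== LEMMAS AND PROOFS =====

-- append-style foldl is a map
theorem pv_foldl_append_map {α β : Type} (f : α → β) (l : List α) (acc : List β) :
    l.foldl (fun a x => a ++ [f x]) acc = acc ++ l.map f := by
  induction l generalizing acc with
  | nil => simp
  | cons x t ih => simp [ih]

-- characterization of the positions dict
theorem pv_build_getD (l : List (Int × Char)) (d : PySem.Dict Char (List Int)) (c : Char) :
    (l.foldl (fun d p => d.insert p.2 (d.getD p.2 [] ++ [p.1])) d).getD c []
      = d.getD c [] ++ (l.filter (fun p => p.2 = c)).map (·.1) := by
  induction l generalizing d with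
  | nil => simp
  | cons p t ih =>
    simp only [List.foldl_cons, ih, List.filter_cons]
    by_cases h : p.2 = c
    · simp [h]
    · simp [h, PySem.Dict.getD_insert, Ne.symm h]

def pvSet1 (row : List Int) (j : Int) : List Int := row.set j.toNat 1

-- setting in-bounds indices commutes with a trailing append
theorem pv_foldl_set_append (js : List Int) (row extra : List Int)
    (h : ∀ j ∈ js, 0 ≤ j ∧ j.toNat < row.length) :
    js.foldl pvSet1 (row ++ extra) = js.foldl pvSet1 row ++ extra := by
  induction js generalizing row with
  | nil => simp
  | cons j t ih =>
    have hj := h j (by simp)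
    simp only [List.foldl_cons, pvSet1]
    rw [List.set_append, if_pos hj.2]
    exact ih (row.set j.toNat 1) (fun x hx => by
      have := h x (by simp [hx]); simpa using this)

-- the positions stored for c in l are exactly the columns where l has c
def pvPs (l : List Char) (c : Char) : List Int :=
  ((PySem.List.enumerate l 0).filter (fun p => p.2 = c)).map (·.1)

theorem pv_mem_ps {l : List Char} {c : Char} {j : Int} (h : j ∈ pvPs l c) :
    0 ≤ j ∧ j.toNat < l.length := by
  simp only [pvPs, List.mem_map, List.mem_filter] at h
  obtain ⟨p, ⟨hp, _⟩, rfl⟩ := h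
  rw [PySem.List.mem_enumerate_iff] at hp
  obtain ⟨k, hk, rfl⟩ := hp
  simp
  omega

-- index-filling a zero row reproduces the per-cell comparison row
theorem pv_fill_row (l : List Char) (c : Char) :
    (pvPs l c).foldl pvSet1 (List.replicate l.length (0 : Int))
      = l.map (fun d => if c = d then (1 : Int) else 0) := by
  induction l using List.reverseRecOn with
  | nil => simp [pvPs]
  | append_singleton xs x ih =>
    have hps : pvPs (xs ++ [x]) c
        = pvPs xs c ++ (if x = c then [(xs.length : Int)] else []) := by
      simp only [pvPs, PySem.List.enumerate_append]
      rw [List.filter_append, List.map_append]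
      congr 1
      by_cases h : x = c <;> simp [PySem.List.enumerate, h]
    have hrep : List.replicate (xs ++ [x]).length (0 : Int)
        = List.replicate xs.length 0 ++ [0] := by
      simp [List.replicate_succ']
    rw [hps, hrep, List.foldl_append,
      pv_foldl_set_append (pvPs xs c) _ [0]
        (by intro j hj; simpa using pv_mem_ps hj), ih]
    by_cases h : x = c
    · simp [h, pvSet1]
    · simp [h, Ne.symm h]

-- ===== VERDICT (by name: the statement is the Claim_ definition above) =====
theorem generate_array_spec : Claim_equal_generate_array := by
  intro str1 str2 _
  unfold Spec_generate_array generate_array generate_array_alt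
  rw [pv_foldl_append_map]
  simp only [List.nil_append]
  apply List.map_congr_left
  intro c _
  rw [pv_foldl_append_map]
  simp only [List.nil_append]
  unfold pvMakeRow pvPositions
  rw [pv_build_getD]
  simpa [pvPs, pvSet1] using (pv_fill_row str2.toList c).symm
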